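-- pv_equiv track=rewrite | github.com/rakeshnreddy/ipl_top4_analysis | extract_table.py | build_state_counts
-- ===== SOURCE A (Python) =====
-- def build_state_counts(
--     fixture_pairs: list[tuple[str, str]],
--     team_index: dict[str, int],
--     team_count: int,
--     forced_outcomes: dict[int, int] | None = None,
-- ) -> dict[tuple[int, ...], int]:
--     state_counts: dict[tuple[int, ...], int] = {tuple([0] * team_count): 1}
--     forced_outcomes = forced_outcomes or {}
--
--     for fixture_idx, (left_key, right_key) in enumerate(fixture_pairs):
--         left = team_index[left_key]
--         right = team_index[right_key]
--         outcomes = (forced_outcomes[fixture_idx],) if fixture_idx in forced_outcomes else (0, 1)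
--         next_counts: dict[tuple[int, ...], int] = {}
--
--         for state, count in state_counts.items():
--             for outcome in outcomes:
--                 mutable = list(state)
--                 mutable[left if outcome == 0 else right] += 1
--                 next_state = tuple(mutable)
--                 next_counts[next_state] = next_counts.get(next_state, 0) + count
--
--         state_counts = next_counts
--
--     return state_counts
-- ===== SOURCE B (Python) =====
-- def build_state_counts(
--     fixture_pairs,
--     team_index,
--     team_count,
--     forced_outcomes=None,
-- ):
--     forced = forced_outcomes or {}
--     counts = {}
--
--     def visit(idx, state):
--         if idx == len(fixture_pairs):
--             key = tuple(state)
--             counts[key] = counts.get(key, 0) + 1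
--             return
--         left_key, right_key = fixture_pairs[idx]
--         outcomes = (forced[idx],) if idx in forced else (0, 1)
--         for outcome in outcomes:
--             team = team_index[left_key] if outcome == 0 else team_index[right_key]
--             child = list(state)
--             child[team] += 1
--             visit(idx + 1, child)
--
--     visit(0, [0] * team_count)
--     return counts
-- ===== Notes on version B (the rewrite author's own statement) =====
-- stated objective: alternative
-- what changed: A's per-fixture dynamic programming that merges state->count dictionaries after every fixture is replaced by a depth-first enumeration of all outcome assignments (backtracking recursion over fixtures), counting each final win-count vector directly into one dictionary.
import Mathlib
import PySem

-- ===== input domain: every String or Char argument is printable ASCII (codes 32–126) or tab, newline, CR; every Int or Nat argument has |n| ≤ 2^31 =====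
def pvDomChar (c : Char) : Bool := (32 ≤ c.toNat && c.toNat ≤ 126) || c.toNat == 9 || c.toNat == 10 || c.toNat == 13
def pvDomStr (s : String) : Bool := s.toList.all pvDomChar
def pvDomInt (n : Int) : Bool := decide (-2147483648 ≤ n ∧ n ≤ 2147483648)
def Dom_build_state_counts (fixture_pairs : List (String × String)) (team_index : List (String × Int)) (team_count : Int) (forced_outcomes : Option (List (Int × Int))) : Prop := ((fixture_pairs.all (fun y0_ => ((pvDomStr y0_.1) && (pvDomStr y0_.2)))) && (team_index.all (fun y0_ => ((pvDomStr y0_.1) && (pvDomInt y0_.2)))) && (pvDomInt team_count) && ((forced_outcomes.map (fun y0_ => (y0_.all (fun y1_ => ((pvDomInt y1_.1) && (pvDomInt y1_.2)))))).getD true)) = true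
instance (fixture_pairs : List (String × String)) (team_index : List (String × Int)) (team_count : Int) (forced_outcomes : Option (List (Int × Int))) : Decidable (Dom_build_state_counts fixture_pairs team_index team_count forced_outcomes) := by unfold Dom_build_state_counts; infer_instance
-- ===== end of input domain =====

-- B replaces A's per-fixture DP merge of state→count dictionaries by a depth-first
-- enumeration of all outcome assignments, counting each final win-count vector once
-- (objective: alternative algorithm, same results; not faster).

-- shared transliteration helpers (the Python expressions both versions contain)
-- team_index[k] : first-match association-list lookup; default 0 unreachable under Pre_ (KeyError excluded)
def pvLookup (team_index : List (String × Int)) (k : String) : Int :=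
  ((team_index.find? (fun q => q.1 == k)).map (·.2)).getD 0

-- forced_outcomes or {}
def pvForced (forced_outcomes : Option (List (Int × Int))) : List (Int × Int) :=
  forced_outcomes.getD []

-- (forced_outcomes[idx],) if idx in forced_outcomes else (0, 1)
def pvOutcomes (forced : List (Int × Int)) (idx : Int) : List Int :=
  match (forced.find? (fun q => q.1 == idx)).map (·.2) with
  | some v => [v]
  | none => [0, 1]

-- ===== PORT A =====
def build_state_counts (fixture_pairs : List (String × String)) (team_index : List (String × Int)) (team_count : Int) (forced_outcomes : Option (List (Int × Int))) : List (List Int × Int) :=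
  let state0 : List Int := PySem.List.pyRepeat [0] team_count
  let forced := pvForced forced_outcomes
  ((PySem.List.enumerate fixture_pairs 0).foldl
    (fun state_counts f =>
      let left := pvLookup team_index f.2.1
      let right := pvLookup team_index f.2.2
      let outcomes := pvOutcomes forced f.1
      state_counts.items.foldl
        (fun next_counts sc =>
          outcomes.foldl
            (fun next_counts outcome =>
              let idx := if outcome == 0 then left else right
              -- mutable[idx] += 1 : pyGetD/pySetD, exact under Pre_ (index in range)
              let next_state := PySem.List.pySetD sc.1 idx (PySem.List.pyGetD sc.1 idx 0 + 1)
              next_counts.insert next_state (next_counts.getD next_state 0 + sc.2))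
            next_counts)
        PySem.Dict.empty)
    (PySem.Dict.mk [(state0, (1 : Int))])).items

-- ===== PORT B =====
-- depth-first enumeration over the remaining fixtures (Python's visit(idx, state))
def pvVisit (team_index : List (String × Int)) (forced : List (Int × Int)) (pairs : List (String × String)) (idx : Int) (state : List Int) (counts : PySem.Dict (List Int) Int) : PySem.Dict (List Int) Int :=
  match pairs with
  | [] => counts.insert state (counts.getD state 0 + 1)
  | f :: rest =>
    (pvOutcomes forced idx).foldl
      (fun counts outcome =>
        let team := if outcome == 0 then pvLookup team_index f.1 else pvLookup team_index f.2
        -- child = list(state); child[team] += 1 : exact under Pre_ (index in range)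
        pvVisit team_index forced rest (idx + 1) (PySem.List.pySetD state team (PySem.List.pyGetD state team 0 + 1)) counts)
      counts

def build_state_counts_alt (fixture_pairs : List (String × String)) (team_index : List (String × Int)) (team_count : Int) (forced_outcomes : Option (List (Int × Int))) : List (List Int × Int) :=
  (pvVisit team_index (pvForced forced_outcomes) fixture_pairs 0 (PySem.List.pyRepeat [0] team_count) PySem.Dict.empty).items

-- ===== PRECONDITION & SPEC =====
-- Pre_ excludes exactly the inputs where the Python A raises: a fixture key missing from
-- team_index (KeyError) or a used team index out of range for the length-team_count state
-- (IndexError); it admits everything A returns on, including negative in-range indices.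
def Pre_build_state_counts (fixture_pairs : List (String × String)) (team_index : List (String × Int)) (team_count : Int) (forced_outcomes : Option (List (Int × Int))) : Prop :=
  ∀ f ∈ PySem.List.enumerate fixture_pairs 0,
    (team_index.find? (fun q => q.1 == f.2.1)).isSome = true ∧
    (team_index.find? (fun q => q.1 == f.2.2)).isSome = true ∧
    ∀ o ∈ pvOutcomes (pvForced forced_outcomes) f.1,
      PySem.Raise.InRange team_count.toNat (if o == 0 then pvLookup team_index f.2.1 else pvLookup team_index f.2.2)
instance (fixture_pairs : List (String × String)) (team_index : List (String × Int)) (team_count : Int) (forced_outcomes : Option (List (Int × Int))) : Decidable (Pre_build_state_counts fixture_pairs team_index team_count forced_outcomes) := by unfold Pre_build_state_counts; infer_instance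

def pvWitness_build_state_counts : (List (String × String)) × (List (String × Int)) × Int × (Option (List (Int × Int))) :=
  ([("a", "b")], [("a", 0), ("b", 1)], 2, none)

def Spec_build_state_counts (fixture_pairs : List (String × String)) (team_index : List (String × Int)) (team_count : Int) (forced_outcomes : Option (List (Int × Int))) (out : List (List Int × Int)) : Prop := out = build_state_counts_alt fixture_pairs team_index team_count forced_outcomes
instance (fixture_pairs : List (String × String)) (team_index : List (String × Int)) (team_count : Int) (forced_outcomes : Option (List (Int × Int))) (out : List (List Int × Int)) : Decidable (Spec_build_state_counts fixture_pairs team_index team_count forced_outcomes out) := by unfold Spec_build_state_counts; infer_instance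

-- ===== CLAIM (what is proved, stated in full; the proofs are below) =====
def Claim_equal_build_state_counts : Prop := ∀ (fixture_pairs : List (String × String)) (team_index : List (String × Int)) (team_count : Int) (forced_outcomes : Option (List (Int × Int))), Dom_build_state_counts fixture_pairs team_index team_count forced_outcomes → Pre_build_state_counts fixture_pairs team_index team_count forced_outcomes → Spec_build_state_counts fixture_pairs team_index team_count forced_outcomes (build_state_counts fixture_pairs team_index team_count forced_outcomes)

-- ===== LEMMAS AND PROOFS =====

theorem pvWitness_ok : Dom_build_state_counts pvWitness_build_state_counts.1 pvWitness_build_state_counts.2.1 pvWitness_build_state_counts.2.2.1 pvWitness_build_state_counts.2.2.2 ∧ Pre_build_state_counts pvWitness_build_state_counts.1 pvWitness_build_state_counts.2.1 pvWitness_build_state_counts.2.2.1 pvWitness_build_state_counts.2.2.2 := by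
  decide

-- the weighted-counter fold both programs reduce to
def stepW (d : PySem.Dict (List Int) Int) (p : List Int × Int) : PySem.Dict (List Int) Int :=
  d.insert p.1 (d.getD p.1 0 + p.2)

def counterW (l : List (List Int × Int)) : PySem.Dict (List Int) Int :=
  l.foldl stepW PySem.Dict.empty

-- total weight of key t in a weighted list
def wt (t : List Int) (l : List (List Int × Int)) : Int :=
  (l.map (fun p => if p.1 = t then p.2 else 0)).sum

-- the state update a single fixture outcome performs
def pvBump (team_index : List (String × Int)) (f : String × String) (o : Int) (s : List Int) : List Int :=
  let idx := if o == 0 then pvLookup team_index f.1 else pvLookup team_index f.2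
  PySem.List.pySetD s idx (PySem.List.pyGetD s idx 0 + 1)

-- all final states reachable from state s through the remaining fixtures, in DFS order
def pvPaths (team_index : List (String × Int)) (forced : List (Int × Int)) : List (String × String) → Int → List Int → List (List Int)
  | [], _, s => [s]
  | f :: fs, i, s => (pvOutcomes forced i).flatMap (fun o => pvPaths team_index forced fs (i + 1) (pvBump team_index f o s))

-- A's per-fixture body, named
def stepA (team_index : List (String × Int)) (forced : List (Int × Int)) (state_counts : PySem.Dict (List Int) Int) (f : Int × (String × String)) : PySem.Dict (List Int) Int :=
  let left := pvLookup team_index f.2.1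
  let right := pvLookup team_index f.2.2
  let outcomes := pvOutcomes forced f.1
  state_counts.items.foldl
    (fun next_counts sc =>
      outcomes.foldl
        (fun next_counts outcome =>
          let idx := if outcome == 0 then left else right
          let next_state := PySem.List.pySetD sc.1 idx (PySem.List.pyGetD sc.1 idx 0 + 1)
          next_counts.insert next_state (next_counts.getD next_state 0 + sc.2))
        next_counts)
    PySem.Dict.empty

theorem build_eq_foldl (fixture_pairs : List (String × String)) (team_index : List (String × Int)) (team_count : Int) (forced_outcomes : Option (List (Int × Int))) :
    build_state_counts fixture_pairs team_index team_count forced_outcomes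
      = ((PySem.List.enumerate fixture_pairs 0).foldl (stepA team_index (pvForced forced_outcomes))
          (PySem.Dict.mk [(PySem.List.pyRepeat [0] team_count, (1 : Int))])).items := rfl

theorem getD_foldl_stepW (l : List (List Int × Int)) (d : PySem.Dict (List Int) Int) (t : List Int) :
    (l.foldl stepW d).getD t 0 = d.getD t 0 + wt t l := by
  induction l generalizing d with
  | nil => simp [wt]
  | cons p l ih =>
    rw [List.foldl_cons, ih]
    simp only [wt, List.map_cons, List.sum_cons, stepW, PySem.Dict.getD_insert]
    by_cases h : t = p.1
    · subst h; rw [if_pos rfl, if_pos rfl]; ring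
    · rw [if_neg h, if_neg (fun e => h e.symm)]; ring

theorem keys_foldl_stepW (l : List (List Int × Int)) (d : PySem.Dict (List Int) Int) :
    (l.foldl stepW d).keys = PySem.Set.update d.keys (l.map Prod.fst) := by
  exact PySem.Dict.keys_foldl_insert_key l Prod.fst (fun d p => d.getD p.1 0 + p.2) d

theorem nodup_keys_counterW (l : List (List Int × Int)) : (counterW l).keys.Nodup := by
  exact PySem.Dict.nodup_keys_foldl_insert_key l Prod.fst (fun d p => d.getD p.1 0 + p.2)
    PySem.Dict.empty (by simp [PySem.Dict.keys_empty])

theorem keys_counterW (l : List (List Int × Int)) :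
    (counterW l).keys = PySem.Set.ofList (l.map Prod.fst) := by
  rw [counterW, keys_foldl_stepW, PySem.Dict.keys_empty, PySem.Set.update_nil_left]

theorem getD_counterW (l : List (List Int × Int)) (t : List Int) :
    (counterW l).getD t 0 = wt t l := by
  rw [counterW, getD_foldl_stepW, PySem.Dict.getD_empty, zero_add]

theorem dict_eq_of_keys_getD (d d' : PySem.Dict (List Int) Int)
    (hd : d.keys.Nodup) (hd' : d'.keys.Nodup) (hk : d.keys = d'.keys)
    (hg : ∀ t, d.getD t 0 = d'.getD t 0) : d = d' := by
  apply PySem.Dict.ext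
  rw [PySem.Dict.items_eq_map_keys d hd 0, PySem.Dict.items_eq_map_keys d' hd' 0, hk]
  exact List.map_congr_left (fun k _ => by rw [hg k])

theorem ofList_filter (l : List (List Int)) (p : List Int → Bool) :
    PySem.Set.ofList (l.filter p) = (PySem.Set.ofList l).filter p := by
  induction l with
  | nil => simp [PySem.Set.ofList_nil]
  | cons y t ih =>
    rw [PySem.Set.ofList_cons]
    simp only [PySem.Set.discard]
    by_cases hp : p y = true
    · rw [List.filter_cons_of_pos hp, PySem.Set.ofList_cons]
      simp only [PySem.Set.discard]
      rw [ih, List.filter_cons_of_pos hp, List.filter_filter, List.filter_filter]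
      congr 1
      apply List.filter_congr
      intro a _
      exact Bool.and_comm _ _
    · rw [List.filter_cons_of_neg hp, ih, List.filter_cons_of_neg hp, List.filter_filter]
      apply List.filter_congr
      intro a _
      cases h : a == y
      · simp
      · have : a = y := eq_of_beq h
        subst this
        simp [hp]

theorem ofList_append_filter (a b : List (List Int)) :
    PySem.Set.ofList (a ++ b)
      = PySem.Set.ofList a ++ (PySem.Set.ofList b).filter (fun y => !(PySem.Set.ofList a).contains y) := by
  rw [PySem.Set.ofList_append, PySem.Set.update_eq_append_filter]

theorem flatMap_filter (t : List (List Int)) (g : List Int → List (List Int)) (q : List Int → Bool) :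
    (t.flatMap g).filter q = t.flatMap (fun s => (g s).filter q) := by
  induction t with
  | nil => simp
  | cons y r ih => simp [List.flatMap_cons, List.filter_append, ih]

theorem flatMap_filter_ne (x : List Int) (h : List Int → List (List Int))
    (hx : ∀ y, (y == x) = true → h y = []) (t : List (List Int)) :
    t.flatMap h = (t.filter (fun y => !(y == x))).flatMap h := by
  induction t with
  | nil => rfl
  | cons y r ih =>
    cases hb : y == x
    · rw [List.filter_cons_of_pos (by simp [hb]), List.flatMap_cons, List.flatMap_cons, ih]
    · rw [List.filter_cons_of_neg (by simp [hb]), List.flatMap_cons, hx y hb, List.nil_append, ih]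

theorem ofList_flatMap_ofList (xs : List (List Int)) (g : List Int → List (List Int)) :
    PySem.Set.ofList ((PySem.Set.ofList xs).flatMap g) = PySem.Set.ofList (xs.flatMap g) := by
  generalize hn : xs.length = n
  induction n using Nat.strong_induction_on generalizing xs with
  | _ n ih =>
    cases xs with
    | nil => simp [PySem.Set.ofList_nil]
    | cons x t =>
      have hlt : (t.filter (fun y => !(y == x))).length < n := by
        have h1 := List.length_filter_le (fun y => !(y == x)) t
        simp only [List.length_cons] at hn
        omega
      have hx : PySem.Set.ofList (x :: t)
          = x :: PySem.Set.ofList (t.filter (fun y => !(y == x))) := by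
        rw [PySem.Set.ofList_cons]
        simp only [PySem.Set.discard]
        rw [ofList_filter]
      rw [hx, List.flatMap_cons, List.flatMap_cons, ofList_append_filter, ofList_append_filter]
      congr 1
      rw [ih _ hlt _ rfl, ← ofList_filter, ← ofList_filter]
      congr 1
      rw [flatMap_filter, flatMap_filter]
      have hempty : ∀ y, (y == x) = true →
          ((g y).filter (fun u => !(PySem.Set.ofList (g x)).contains u)) = [] := by
        intro y hy
        have : y = x := eq_of_beq hy
        subst this
        rw [List.filter_eq_nil_iff]
        intro u hu
        simp only [Bool.not_eq_true', Bool.not_eq_false]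
        exact (PySem.Set.contains_iff _ _).mpr ((PySem.Set.mem_ofList _ _).mpr hu)
      exact (flatMap_filter_ne x _ hempty t).symm

theorem wt_scale (t : List Int) (us : List (List Int)) (c : Int) :
    wt t (us.map (fun u => (u, c))) = c * wt t (us.map (fun u => (u, 1))) := by
  induction us with
  | nil => simp [wt]
  | cons u r ih =>
    simp only [wt, List.map_cons, List.map_map, List.sum_cons] at ih ⊢
    rw [ih]
    by_cases h : u = t
    · subst h; rw [if_pos rfl, if_pos rfl]; ring
    · rw [if_neg h, if_neg h]; ring

theorem wt_append (t : List Int) (a b : List (List Int × Int)) :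
    wt t (a ++ b) = wt t a + wt t b := by
  simp [wt]

theorem wt_flatMap (t : List Int) (br : List Int → List (List Int)) (l : List (List Int × Int)) :
    wt t (l.flatMap (fun p => (br p.1).map (fun u => (u, p.2))))
      = (l.map (fun p => p.2 * wt t ((br p.1).map (fun u => (u, 1))))).sum := by
  induction l with
  | nil => simp [wt]
  | cons p r ih =>
    rw [List.flatMap_cons, wt_append, ih, wt_scale, List.map_cons, List.sum_cons]

theorem wt_zero_of_not_mem (t : List Int) (l : List (List Int × Int)) (h : t ∉ l.map Prod.fst) :
    wt t l = 0 := by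
  induction l with
  | nil => rfl
  | cons p r ih =>
    simp only [List.map_cons, List.mem_cons, not_or] at h
    simp only [wt, List.map_cons, List.sum_cons] at ih ⊢
    rw [if_neg (fun e => h.1 e.symm), zero_add]
    exact ih h.2

theorem sum_extract (S : List (List Int)) (hS : S.Nodup) (f : List Int → Int) (a : List Int)
    (hmem : a ∈ S) :
    f a + ((S.filter (fun y => !(y == a))).map f).sum = (S.map f).sum := by
  induction S with
  | nil => cases hmem
  | cons x r ih =>
    obtain ⟨hx, hr⟩ := List.nodup_cons.mp hS
    by_cases hax : x = a
    · subst hax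
      rw [List.filter_cons_of_neg (by simp)]
      have hfil : r.filter (fun y => !(y == x)) = r :=
        List.filter_eq_self.mpr (fun y hy => by
          simp only [Bool.not_eq_eq_eq_not, Bool.not_true, beq_eq_false_iff_ne, ne_eq]
          exact fun e => hx (e ▸ hy))
      rw [hfil, List.map_cons, List.sum_cons]
    · have hmem' : a ∈ r := by
        cases List.mem_cons.mp hmem with
        | inl e => exact absurd e.symm hax
        | inr hm => exact hm
      rw [List.filter_cons_of_pos (by simp [beq_eq_false_iff_ne]; exact fun e => hax e)]
      rw [List.map_cons, List.sum_cons, List.map_cons, List.sum_cons, ← ih hr hmem']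
      ring

theorem sum_grouped (l : List (List Int × Int)) (h : List Int → Int) :
    ((PySem.Set.ofList (l.map Prod.fst)).map (fun k => wt k l * h k)).sum
      = (l.map (fun p => p.2 * h p.1)).sum := by
  induction l with
  | nil => simp [PySem.Set.ofList_nil]
  | cons p t ih =>
    have hS : (PySem.Set.ofList (t.map Prod.fst)).Nodup := PySem.Set.nodup_ofList _
    have hwt_cons : ∀ k, wt k (p :: t) = (if p.1 = k then p.2 else 0) + wt k t := fun k => by
      simp only [wt, List.map_cons, List.sum_cons]
    rw [List.map_cons, PySem.Set.ofList_cons]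
    simp only [PySem.Set.discard]
    rw [List.map_cons, List.sum_cons, hwt_cons p.1, if_pos rfl]
    have hcongr :
        (((PySem.Set.ofList (t.map Prod.fst)).filter (fun y => !(y == p.1))).map
          (fun k => wt k (p :: t) * h k))
        = (((PySem.Set.ofList (t.map Prod.fst)).filter (fun y => !(y == p.1))).map
          (fun k => wt k t * h k)) := by
      apply List.map_congr_left
      intro k hk
      have hne := List.of_mem_filter hk
      simp only [Bool.not_eq_eq_eq_not, Bool.not_true, beq_eq_false_iff_ne, ne_eq] at hne
      rw [hwt_cons k, if_neg (fun e => hne e.symm), zero_add]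
    rw [hcongr]
    by_cases hmem : p.1 ∈ PySem.Set.ofList (t.map Prod.fst)
    · have hext := sum_extract _ hS (fun k => wt k t * h k) p.1 hmem
      have expand : (p.2 + wt p.1 t) * h p.1 = p.2 * h p.1 + wt p.1 t * h p.1 := by ring
      rw [expand, add_assoc, hext, ih, List.map_cons, List.sum_cons]
    · have h0 : wt p.1 t = 0 := wt_zero_of_not_mem _ _ (by
        rwa [PySem.Set.mem_ofList] at hmem)
      have hfil : (PySem.Set.ofList (t.map Prod.fst)).filter (fun y => !(y == p.1))
          = PySem.Set.ofList (t.map Prod.fst) :=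
        List.filter_eq_self.mpr (fun y hy => by
          simp only [Bool.not_eq_eq_eq_not, Bool.not_true, beq_eq_false_iff_ne, ne_eq]
          exact fun e => hmem (e ▸ hy))
      rw [hfil, h0, add_zero, ih, List.map_cons, List.sum_cons]

-- merging states before expanding them does not change the resulting counter
theorem counterW_expand_items (br : List Int → List (List Int)) (l : List (List Int × Int)) :
    counterW (((counterW l).items).flatMap (fun p => (br p.1).map (fun u => (u, p.2))))
      = counterW (l.flatMap (fun p => (br p.1).map (fun u => (u, p.2)))) := by
  apply dict_eq_of_keys_getD _ _ (nodup_keys_counterW _) (nodup_keys_counterW _)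
  · rw [keys_counterW, keys_counterW]
    have hmapfst : ∀ (m : List (List Int × Int)),
        (m.flatMap (fun p => (br p.1).map (fun u => (u, p.2)))).map Prod.fst
          = (m.map Prod.fst).flatMap br := by
      intro m
      rw [List.map_flatMap, List.flatMap_map]
      simp [List.map_map, Function.comp_def]
    rw [hmapfst, hmapfst]
    have hkeys : (counterW l).items.map Prod.fst = PySem.Set.ofList (l.map Prod.fst) := by
      have h := keys_counterW l
      simpa [PySem.Dict.keys] using h
    rw [hkeys]
    exact ofList_flatMap_ofList _ br
  · intro t
    rw [getD_counterW, getD_counterW, wt_flatMap, wt_flatMap]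
    have hitems : (counterW l).items
        = ((counterW l).keys).map (fun k => (k, (counterW l).getD k 0)) :=
      PySem.Dict.items_eq_map_keys _ (nodup_keys_counterW l) 0
    rw [hitems, List.map_map]
    simp only [Function.comp_def]
    rw [keys_counterW]
    have hcong :
        ((PySem.Set.ofList (l.map Prod.fst)).map
          (fun k => (counterW l).getD k 0 * wt t ((br k).map (fun u => (u, 1))))).sum
        = ((PySem.Set.ofList (l.map Prod.fst)).map
          (fun k => wt k l * wt t ((br k).map (fun u => (u, 1))))).sum := by
      congr 1
      apply List.map_congr_left
      intro k _
      rw [getD_counterW]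
    rw [hcong, sum_grouped]

theorem stepA_eq_counterW (team_index : List (String × Int)) (forced : List (Int × Int))
    (d : PySem.Dict (List Int) Int) (i : Int) (f : String × String) :
    stepA team_index forced d (i, f)
      = counterW (d.items.flatMap (fun p =>
          ((pvOutcomes forced i).map (fun o => pvBump team_index f o p.1)).map (fun u => (u, p.2)))) := by
  simp only [stepA, counterW, List.foldl_flatMap, List.foldl_map]
  rfl

theorem foldl_stepA_counterW (team_index : List (String × Int)) (forced : List (Int × Int))
    (fs : List (String × String)) (i : Int) (l : List (List Int × Int)) :
    (PySem.List.enumerate fs i).foldl (stepA team_index forced) (counterW l)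
      = counterW (l.flatMap (fun p => (pvPaths team_index forced fs i p.1).map (fun u => (u, p.2)))) := by
  induction fs generalizing i l with
  | nil =>
    rw [PySem.List.enumerate_nil]
    simp only [List.foldl_nil, pvPaths]
    congr 1
    simp
  | cons f fs ih =>
    rw [PySem.List.enumerate_cons, List.foldl_cons, stepA_eq_counterW]
    have hE := counterW_expand_items
      (fun s => (pvOutcomes forced i).map (fun o => pvBump team_index f o s)) l
    rw [hE, ih]
    congr 1
    rw [List.flatMap_assoc]
    have hfun : (fun (p : List Int × Int) =>
        ((((pvOutcomes forced i).map (fun o => pvBump team_index f o p.1)).map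
            (fun u => (u, p.2))).flatMap
          (fun q => (pvPaths team_index forced fs (i + 1) q.1).map (fun u => (u, q.2)))))
        = (fun (p : List Int × Int) =>
          (pvPaths team_index forced (f :: fs) i p.1).map (fun u => (u, p.2))) := by
      funext p
      simp [pvPaths, List.flatMap_map, List.map_flatMap]
    rw [hfun]

theorem pvVisit_eq_foldl (team_index : List (String × Int)) (forced : List (Int × Int))
    (fs : List (String × String)) (i : Int) (s : List Int) (d : PySem.Dict (List Int) Int) :
    pvVisit team_index forced fs i s d
      = (pvPaths team_index forced fs i s).foldl (fun d t => d.insert t (d.getD t 0 + 1)) d := by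
  induction fs generalizing i s d with
  | nil => rfl
  | cons f fs ih =>
    simp only [pvVisit, pvPaths, List.foldl_flatMap]
    apply PySem.List.foldl_congr_mem
    intro acc o _
    exact ih (i + 1) (pvBump team_index f o s) acc

-- ===== VERDICT (by name: the statement is the Claim_ definition above) =====
theorem build_state_counts_spec : Claim_equal_build_state_counts := by
  unfold Claim_equal_build_state_counts
  intro fixture_pairs team_index team_count forced_outcomes _ _
  unfold Spec_build_state_counts
  rw [build_eq_foldl]
  have h0 : (PySem.Dict.mk [(PySem.List.pyRepeat [0] team_count, (1 : Int))])
      = counterW [(PySem.List.pyRepeat [0] team_count, 1)] := rfl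
  rw [h0, foldl_stepA_counterW, List.flatMap_singleton]
  unfold build_state_counts_alt
  rw [pvVisit_eq_foldl, counterW, List.foldl_map]
  rfl
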